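-- pv_equiv track=rewrite | github.com/whw917/calibration_platform | pymac/utils/crcUtils.py | GenByeCRCModBus
-- ===== SOURCE A (Python) =====
-- def GenByeCRCModBus(cDataIn, wCRCIn):
--     wCheck = 0
--     lnByte = cDataIn & 0xFF
--     wCRCIn = wCRCIn ^ lnByte
--
--     for i in range(8):
--         wCheck = wCRCIn & 1
--         wCRCIn = wCRCIn >> 1
--         wCRCIn = wCRCIn & 0x7fff
--
--         if wCheck == 1 :
--             wCRCIn = wCRCIn ^ 0xa001
--
--         wCRCIn = wCRCIn & 0xffff
--
--     return wCRCIn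
-- ===== SOURCE B (Python) =====
-- # Table-driven MODBUS CRC16 byte update: precomputed 256-entry table replaces the 8-step bit loop.
-- def _crc8(byte):
--     crc = byte
--     for _ in range(8):
--         crc = (crc >> 1) ^ 0xA001 if crc & 1 else crc >> 1
--     return crc
--
-- _TABLE = [_crc8(j) for j in range(256)]
--
-- def GenByeCRCModBus(cDataIn, wCRCIn):
--     crc = wCRCIn & 0xFFFF
--     return (crc >> 8) ^ _TABLE[(crc ^ cDataIn) & 0xFF]
-- ===== Notes on version B (the rewrite author's own statement) =====
-- stated objective: faster
-- what changed: Replaces A's per-call 8-iteration bit-by-bit CRC loop with a 256-entry lookup table precomputed once at module load; each call is a mask, a shift, an xor and one table lookup.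
import Mathlib
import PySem

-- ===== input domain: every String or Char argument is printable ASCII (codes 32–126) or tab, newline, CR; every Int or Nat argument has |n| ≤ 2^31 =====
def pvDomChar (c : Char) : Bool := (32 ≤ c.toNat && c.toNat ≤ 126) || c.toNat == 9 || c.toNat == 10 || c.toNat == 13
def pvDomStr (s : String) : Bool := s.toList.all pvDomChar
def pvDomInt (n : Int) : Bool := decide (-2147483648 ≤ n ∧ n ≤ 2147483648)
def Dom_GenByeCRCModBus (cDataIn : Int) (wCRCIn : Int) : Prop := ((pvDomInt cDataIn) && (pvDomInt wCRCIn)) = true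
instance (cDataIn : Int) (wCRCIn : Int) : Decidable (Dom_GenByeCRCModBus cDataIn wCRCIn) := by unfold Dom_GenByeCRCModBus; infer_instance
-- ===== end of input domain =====

-- B replaces A's per-call 8-iteration bit loop by a 256-entry table (built once from the same bit loop) and a single lookup per call; same return value on all inputs.


-- ===== PORT A =====
def GenByeCRCModBus (cDataIn : Int) (wCRCIn : Int) : Int :=
  -- lnByte = cDataIn & 0xFF; wCRCIn = wCRCIn ^ lnByte; then 8 iterations of the bit loop
  (List.range 8).foldl (fun wCRC _ =>
    PySem.Int.band
      (if PySem.Int.band wCRC 1 = 1 then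
        PySem.Int.bxor (PySem.Int.band (wCRC >>> (1 : Nat)) 0x7fff) 0xa001
      else PySem.Int.band (wCRC >>> (1 : Nat)) 0x7fff) 0xffff)
    (PySem.Int.bxor wCRCIn (PySem.Int.band cDataIn 0xFF))

-- ===== PORT B =====
-- _crc8(byte): the 8-step MODBUS bit loop on one byte (used only to build the table)
def pvCrc8 (byte : Int) : Int :=
  (List.range 8).foldl (fun crc _ =>
    if PySem.Int.band crc 1 ≠ 0 then PySem.Int.bxor (crc >>> (1 : Nat)) 0xA001
    else crc >>> (1 : Nat)) byte

-- _TABLE = [_crc8(j) for j in range(256)]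
def pvTable : List Int := (List.range 256).map (fun j => pvCrc8 (Int.ofNat j))

def GenByeCRCModBus_alt (cDataIn : Int) (wCRCIn : Int) : Int :=
  -- crc = wCRCIn & 0xFFFF; return (crc >> 8) ^ _TABLE[(crc ^ cDataIn) & 0xFF]
  -- the index is always in 0..255, so the .getD 0 default is never used
  PySem.Int.bxor ((PySem.Int.band wCRCIn 0xFFFF) >>> (8 : Nat))
    ((PySem.List.pyGet? pvTable
        (PySem.Int.band (PySem.Int.bxor (PySem.Int.band wCRCIn 0xFFFF) cDataIn) 0xFF)).getD 0)

-- ===== PRECONDITION & SPEC =====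
def Spec_GenByeCRCModBus (cDataIn : Int) (wCRCIn : Int) (out : Int) : Prop := out = GenByeCRCModBus_alt cDataIn wCRCIn
instance (cDataIn : Int) (wCRCIn : Int) (out : Int) : Decidable (Spec_GenByeCRCModBus cDataIn wCRCIn out) := by unfold Spec_GenByeCRCModBus; infer_instance

-- ===== CLAIM (what is proved, stated in full; the proofs are below) =====
def Claim_equal_GenByeCRCModBus : Prop := ∀ (cDataIn : Int) (wCRCIn : Int), Dom_GenByeCRCModBus cDataIn wCRCIn → Spec_GenByeCRCModBus cDataIn wCRCIn (GenByeCRCModBus cDataIn wCRCIn)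

-- ===== LEMMAS AND PROOFS =====

-- Nat-level model of one CRC step (no masks: on inputs < 2^16 A's masks are identities)
def pvStepN (c : Nat) : Nat := if c % 2 = 1 then (c / 2) ^^^ 40961 else c / 2

-- xor distributes over % 2^k
theorem pv_xor_mod (x y k : Nat) : (x ^^^ y) % 2 ^ k = (x % 2 ^ k) ^^^ (y % 2 ^ k) := by
  apply Nat.eq_of_testBit_eq
  intro i
  simp only [Nat.testBit_mod_two_pow, Nat.testBit_xor]
  by_cases h : i < k <;> simp [h]

-- xor distributes over / 2^k
theorem pv_xor_div_pow (x y k : Nat) : (x ^^^ y) / 2 ^ k = (x / 2 ^ k) ^^^ (y / 2 ^ k) := by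
  induction k generalizing x y with
  | zero => simp
  | succ k ih =>
    have hx : ∀ z : Nat, z / 2 ^ (k + 1) = (z / 2) / 2 ^ k := by
      intro z
      rw [Nat.div_div_eq_div_mul]
      ring_nf
    rw [hx, hx, hx, Nat.xor_div_two, ih]

-- subtraction from an all-ones mask is xor with the mask
theorem pv_sub_allones (k : Nat) : ∀ y : Nat, y < 2 ^ k → 2 ^ k - 1 - y = (2 ^ k - 1) ^^^ y := by
  induction k with
  | zero =>
    intro y hy
    have : y = 0 := by omega
    subst this
    rfl
  | succ k ih =>
    intro y hy
    have h2 : (2 ^ (k + 1) - 1) ^^^ y = 2 * (((2 ^ (k + 1) - 1) ^^^ y) / 2) + ((2 ^ (k + 1) - 1) ^^^ y) % 2 := by omega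
    have hdiv : ((2 ^ (k + 1) - 1) ^^^ y) / 2 = (2 ^ k - 1) ^^^ (y / 2) := by
      rw [Nat.xor_div_two]
      congr 1
      omega
    have hmod : ((2 ^ (k + 1) - 1) ^^^ y) % 2 = 1 ^^^ (y % 2) := by
      have h := pv_xor_mod (2 ^ (k + 1) - 1) y 1
      simp only [pow_one] at h
      rw [h]
      congr 1
      have : (2:Nat) ^ (k + 1) = 2 * 2 ^ k := by ring
      omega
    have hih : (2 ^ k - 1) ^^^ (y / 2) = 2 ^ k - 1 - y / 2 := (ih (y / 2) (by omega)).symm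
    have hm : (1 : Nat) ^^^ (y % 2) = 1 - y % 2 := by
      have : y % 2 = 0 ∨ y % 2 = 1 := by omega
      rcases this with h | h <;> simp [h]
    rw [h2, hdiv, hmod, hih, hm]
    omega

-- Python % 2^k of a negative number -(u+1)
theorem pv_negmod (u : Nat) (k : Nat) :
    (-(u : Int) - 1) % ((2 ^ k : Nat) : Int) = ((2 ^ k - 1 - u % 2 ^ k : Nat) : Int) := by
  have h0 : (0:Nat) < 2 ^ k := Nat.two_pow_pos k
  have hm : u % 2 ^ k < 2 ^ k := Nat.mod_lt _ h0
  have key : (-(u : Int) - 1)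
      = ((2 ^ k : Nat) : Int) * (-(((u / 2 ^ k : Nat)) : Int) - 1) + ((2 ^ k - 1 - u % 2 ^ k : Nat) : Int) := by
    have hu : (u : Int) = ((2 ^ k : Nat) : Int) * ((u / 2 ^ k : Nat) : Int) + ((u % 2 ^ k : Nat) : Int) := by
      exact_mod_cast congrArg (Nat.cast : Nat → Int) (Nat.div_add_mod u (2 ^ k)).symm
    rw [Nat.cast_sub (by omega : u % 2 ^ k ≤ 2 ^ k - 1), Nat.cast_sub (by omega : (1:Nat) ≤ 2 ^ k)]
    push_cast at hu ⊢
    linear_combination -hu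
  rw [key, Int.add_comm, Int.add_mul_emod_self_left]
  exact Int.emod_eq_of_lt (Int.natCast_nonneg _)
    (by exact_mod_cast (show (2 ^ k - 1 - u % 2 ^ k : Nat) < 2 ^ k by omega))

-- Python & with an all-ones mask is % 2^k (exact also on negatives)
theorem pv_band_pow (z : Int) (k : Nat) :
    PySem.Int.band z (((2 ^ k - 1 : Nat) : Int)) = z % ((2 ^ k : Nat) : Int) := by
  have hmnn : (0:Int) ≤ ((2 ^ k - 1 : Nat) : Int) := Int.natCast_nonneg _
  by_cases hz : 0 ≤ z
  · obtain ⟨m, rfl⟩ : ∃ m : Nat, z = ↑m := ⟨z.toNat, (Int.toNat_of_nonneg hz).symm⟩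
    unfold PySem.Int.band
    rw [if_pos hz, if_pos hmnn, Int.toNat_natCast, Int.toNat_natCast,
      Nat.and_two_pow_sub_one_eq_mod, Int.natCast_mod]
  · obtain ⟨u, rfl⟩ : ∃ u : Nat, z = -↑u - 1 :=
      ⟨(-z - 1).toNat, by
        have h1 : 0 ≤ -z - 1 := by omega
        rw [Int.toNat_of_nonneg h1]; ring⟩
    unfold PySem.Int.band
    rw [if_neg hz, if_pos hmnn, Int.toNat_natCast]
    have harg : (-(-(u : Int) - 1) - 1) = (u : Int) := by ring
    rw [harg, Int.toNat_natCast, pv_negmod u k]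
    congr 1
    rw [Nat.and_comm, Nat.and_two_pow_sub_one_eq_mod]

theorem pv_band1 (z : Int) : PySem.Int.band z 1 = z % 2 := by
  have h := pv_band_pow z 1; norm_num at h; exact h

theorem pv_band255 (z : Int) : PySem.Int.band z 255 = z % 256 := by
  have h := pv_band_pow z 8; norm_num at h; exact h

theorem pv_band32767 (z : Int) : PySem.Int.band z 32767 = z % 32768 := by
  have h := pv_band_pow z 15; norm_num at h; exact h

theorem pv_band65535 (z : Int) : PySem.Int.band z 65535 = z % 65536 := by
  have h := pv_band_pow z 16; norm_num at h; exact h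

-- xor of three, cancellation helper
theorem pv_xor_cancel (p q r : Nat) : (r ^^^ p) ^^^ (r ^^^ q) = p ^^^ q := by
  rw [Nat.xor_comm r p, Nat.xor_assoc, ← Nat.xor_assoc r r q, Nat.xor_self, Nat.zero_xor]

-- Python ^ then % 2^k, as Nats (exact on all sign combinations)
theorem pv_bxor_mod (a b : Int) (k : Nat) :
    ((PySem.Int.bxor a b) % ((2 ^ k : Nat) : Int)).toNat
      = ((a % ((2 ^ k : Nat) : Int)).toNat) ^^^ ((b % ((2 ^ k : Nat) : Int)).toNat) := by
  have h0 : (0:Nat) < 2 ^ k := Nat.two_pow_pos k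
  have hlt : ∀ m : Nat, m % 2 ^ k < 2 ^ k := fun m => Nat.mod_lt _ h0
  have hpos : ∀ (m : Nat), (((m : Int)) % ((2 ^ k : Nat) : Int)).toNat = m % 2 ^ k := by
    intro m; rw [← Int.natCast_mod, Int.toNat_natCast]
  have hneg : ∀ (u : Nat), ((-(u : Int) - 1) % ((2 ^ k : Nat) : Int)).toNat = 2 ^ k - 1 - u % 2 ^ k := by
    intro u; rw [pv_negmod, Int.toNat_natCast]
  have hsub : ∀ m : Nat, 2 ^ k - 1 - m % 2 ^ k = (2 ^ k - 1) ^^^ (m % 2 ^ k) :=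
    fun m => pv_sub_allones k _ (hlt m)
  by_cases ha : 0 ≤ a
  · obtain ⟨m, rfl⟩ : ∃ m : Nat, a = ↑m := ⟨a.toNat, (Int.toNat_of_nonneg ha).symm⟩
    by_cases hb : 0 ≤ b
    · obtain ⟨n, rfl⟩ : ∃ n : Nat, b = ↑n := ⟨b.toNat, (Int.toNat_of_nonneg hb).symm⟩
      unfold PySem.Int.bxor
      rw [if_pos ha, if_pos hb, Int.toNat_natCast, Int.toNat_natCast, hpos, hpos, hpos, pv_xor_mod]
    · obtain ⟨v, rfl⟩ : ∃ v : Nat, b = -↑v - 1 :=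
        ⟨(-b - 1).toNat, by
          have h1 : 0 ≤ -b - 1 := by omega
          rw [Int.toNat_of_nonneg h1]; ring⟩
      unfold PySem.Int.bxor
      rw [if_pos ha, if_neg hb, Int.toNat_natCast]
      have harg : (-(-(v : Int) - 1) - 1) = (v : Int) := by ring
      rw [harg, Int.toNat_natCast, hneg, hneg, hpos, pv_xor_mod, hsub v,
        pv_sub_allones k _ (Nat.xor_lt_two_pow (hlt m) (hlt v)),
        ← Nat.xor_assoc, ← Nat.xor_assoc, Nat.xor_comm (2 ^ k - 1) (m % 2 ^ k)]
  · obtain ⟨u, rfl⟩ : ∃ u : Nat, a = -↑u - 1 :=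
      ⟨(-a - 1).toNat, by
        have h1 : 0 ≤ -a - 1 := by omega
        rw [Int.toNat_of_nonneg h1]; ring⟩
    by_cases hb : 0 ≤ b
    · obtain ⟨n, rfl⟩ : ∃ n : Nat, b = ↑n := ⟨b.toNat, (Int.toNat_of_nonneg hb).symm⟩
      unfold PySem.Int.bxor
      rw [if_neg ha, if_pos hb, Int.toNat_natCast]
      have harg : (-(-(u : Int) - 1) - 1) = (u : Int) := by ring
      rw [harg, Int.toNat_natCast, hneg, hneg, hpos, pv_xor_mod, hsub u,
        pv_sub_allones k _ (Nat.xor_lt_two_pow (hlt u) (hlt n))]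
      exact (Nat.xor_assoc _ _ _).symm
    · obtain ⟨v, rfl⟩ : ∃ v : Nat, b = -↑v - 1 :=
        ⟨(-b - 1).toNat, by
          have h1 : 0 ≤ -b - 1 := by omega
          rw [Int.toNat_of_nonneg h1]; ring⟩
      unfold PySem.Int.bxor
      rw [if_neg ha, if_neg hb]
      have hargu : (-(-(u : Int) - 1) - 1) = (u : Int) := by ring
      have hargv : (-(-(v : Int) - 1) - 1) = (v : Int) := by ring
      rw [hargu, hargv, Int.toNat_natCast, Int.toNat_natCast, hpos, hneg, hneg, pv_xor_mod,
        hsub u, hsub v, pv_xor_cancel]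

theorem pv_bxor256 (a b : Int) :
    ((PySem.Int.bxor a b) % 256).toNat = ((a % 256).toNat) ^^^ ((b % 256).toNat) := by
  have h := pv_bxor_mod a b 8; norm_num at h; exact h

theorem pv_bxor65536 (a b : Int) :
    ((PySem.Int.bxor a b) % 65536).toNat = ((a % 65536).toNat) ^^^ ((b % 65536).toNat) := by
  have h := pv_bxor_mod a b 16; norm_num at h; exact h

-- Int >>> 1 and >>> 8 are floor division by 2 and 256
theorem pv_shr1 (z : Int) : z >>> (1 : Nat) = z / 2 := by
  cases z with
  | ofNat m =>
    show ((m >>> 1 : Nat) : Int) = (m : Int) / 2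
    rw [Nat.shiftRight_eq_div_pow, pow_one]
    omega
  | negSucc m =>
    show Int.negSucc (m >>> 1) = Int.negSucc m / 2
    rw [Nat.shiftRight_eq_div_pow, pow_one, Int.negSucc_eq, Int.negSucc_eq]
    omega

theorem pv_shr8 (z : Int) : z >>> (8 : Nat) = z / 256 := by
  cases z with
  | ofNat m =>
    show ((m >>> 8 : Nat) : Int) = (m : Int) / 256
    rw [Nat.shiftRight_eq_div_pow]
    omega
  | negSucc m =>
    show Int.negSucc (m >>> 8) = Int.negSucc m / 256
    rw [Nat.shiftRight_eq_div_pow, Int.negSucc_eq, Int.negSucc_eq]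
    omega

-- one step of A's loop body equals the Nat model on the 16-bit residue
theorem pv_stepA (z : Int) :
    PySem.Int.band
      (if PySem.Int.band z 1 = 1 then
        PySem.Int.bxor (PySem.Int.band (z >>> (1 : Nat)) 0x7fff) 0xa001
      else PySem.Int.band (z >>> (1 : Nat)) 0x7fff) 0xffff
    = ((pvStepN ((z % 65536).toNat) : Nat) : Int) := by
  set r : Nat := (z % 65536).toNat with hr
  have hz65 : z % 65536 = (r : Int) := by
    have : (0:Int) ≤ z % 65536 := Int.emod_nonneg z (by norm_num)
    omega
  have hrlt : r < 65536 := by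
    have : z % 65536 < 65536 := Int.emod_lt_of_pos z (by norm_num)
    omega
  have hm1 : PySem.Int.band z 1 = ((r % 2 : Nat) : Int) := by
    rw [pv_band1]
    omega
  have hm15 : PySem.Int.band (z >>> (1 : Nat)) 0x7fff = ((r / 2 : Nat) : Int) := by
    rw [pv_shr1, pv_band32767]
    omega
  rw [hm1, hm15]
  unfold pvStepN
  by_cases hp : r % 2 = 1
  · rw [if_pos (show ((r % 2 : Nat) : Int) = 1 by rw [hp]; norm_num), if_pos hp]
    rw [show (0xa001 : Int) = ((40961 : Nat) : Int) from by norm_num, PySem.Int.bxor_natCast,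
      pv_band65535]
    have hlt2 : (r / 2) ^^^ 40961 < 65536 := by
      have := Nat.xor_lt_two_pow (n := 16) (x := r / 2) (y := 40961) (by omega) (by norm_num)
      omega
    omega
  · rw [if_neg (show ¬ ((r % 2 : Nat) : Int) = 1 by
        have h0 : r % 2 = 0 := by omega
        rw [h0]; norm_num), if_neg hp, pv_band65535]
    omega

theorem pv_stepN_lt {c : Nat} (h : c < 65536) : pvStepN c < 65536 := by
  unfold pvStepN
  split
  · have := Nat.xor_lt_two_pow (n := 16) (x := c / 2) (y := 40961) (by omega) (by norm_num)
    omega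
  · omega

theorem pv_iterN_lt (k : Nat) {c : Nat} (h : c < 65536) : pvStepN^[k] c < 65536 := by
  induction k with
  | zero => simpa using h
  | succ k ih =>
    rw [Function.iterate_succ_apply']
    exact pv_stepN_lt ih

-- A's fold over range (k+1) computes the Nat model iterated k+1 times
theorem pv_foldA (k : Nat) (z : Int) :
    (List.range (k + 1)).foldl (fun wCRC _ =>
      PySem.Int.band
        (if PySem.Int.band wCRC 1 = 1 then
          PySem.Int.bxor (PySem.Int.band (wCRC >>> (1 : Nat)) 0x7fff) 0xa001
        else PySem.Int.band (wCRC >>> (1 : Nat)) 0x7fff) 0xffff) z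
    = ((pvStepN^[k + 1] ((z % 65536).toNat) : Nat) : Int) := by
  induction k with
  | zero =>
    rw [List.range_succ, List.range_zero, List.nil_append, List.foldl_cons, List.foldl_nil]
    exact pv_stepA z
  | succ k ih =>
    rw [List.range_succ, List.foldl_append, List.foldl_cons, List.foldl_nil, ih]
    have hs : (z % 65536).toNat < 65536 := by omega
    have hlt : pvStepN^[k + 1] ((z % 65536).toNat) < 65536 := pv_iterN_lt _ hs
    have hstep := pv_stepA (((pvStepN^[k + 1] ((z % 65536).toNat) : Nat) : Int))
    have harg : ((((pvStepN^[k + 1] ((z % 65536).toNat) : Nat) : Int)) % 65536).toNat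
        = pvStepN^[k + 1] ((z % 65536).toNat) := by omega
    rw [harg] at hstep
    conv_rhs => rw [Function.iterate_succ_apply']
    exact hstep

theorem pv_foldA8 (z : Int) :
    (List.range 8).foldl (fun wCRC _ =>
      PySem.Int.band
        (if PySem.Int.band wCRC 1 = 1 then
          PySem.Int.bxor (PySem.Int.band (wCRC >>> (1 : Nat)) 0x7fff) 0xa001
        else PySem.Int.band (wCRC >>> (1 : Nat)) 0x7fff) 0xffff) z
    = ((pvStepN^[8] ((z % 65536).toNat) : Nat) : Int) := by
  have h := pv_foldA 7 z
  norm_num at h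
  exact h

-- one step of B's bit loop equals the Nat model on inputs < 2^16
theorem pv_stepB (n : Nat) (_h : n < 65536) :
    (if PySem.Int.band ((n : Nat) : Int) 1 ≠ 0 then
      PySem.Int.bxor (((n : Nat) : Int) >>> (1 : Nat)) 0xA001
    else ((n : Nat) : Int) >>> (1 : Nat))
    = ((pvStepN n : Nat) : Int) := by
  have hm1 : PySem.Int.band ((n : Nat) : Int) 1 = ((n % 2 : Nat) : Int) := by
    rw [pv_band1]; omega
  have hsh : ((n : Nat) : Int) >>> (1 : Nat) = ((n / 2 : Nat) : Int) := by
    rw [pv_shr1]; omega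
  rw [hm1, hsh]
  unfold pvStepN
  by_cases hp : n % 2 = 1
  · rw [if_pos (show ((n % 2 : Nat) : Int) ≠ 0 by rw [hp]; norm_num), if_pos hp]
    rw [show (0xA001 : Int) = ((40961 : Nat) : Int) from by norm_num, PySem.Int.bxor_natCast]
  · have h0 : n % 2 = 0 := by omega
    rw [if_neg (show ¬ ((n % 2 : Nat) : Int) ≠ 0 by rw [h0]; norm_num), if_neg hp]

-- B's byte loop computes 8 iterations of the Nat model
theorem pv_crc8 (n : Nat) (h : n < 65536) :
    pvCrc8 ((n : Nat) : Int) = ((pvStepN^[8] n : Nat) : Int) := by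
  unfold pvCrc8
  have main : ∀ k : Nat, (List.range k).foldl (fun crc _ =>
      if PySem.Int.band crc 1 ≠ 0 then PySem.Int.bxor (crc >>> (1 : Nat)) 0xA001
      else crc >>> (1 : Nat)) ((n : Nat) : Int) = ((pvStepN^[k] n : Nat) : Int) := by
    intro k
    induction k with
    | zero => simp
    | succ k ih =>
      rw [List.range_succ, List.foldl_append, List.foldl_cons, List.foldl_nil, ih,
        Function.iterate_succ_apply']
      exact pv_stepB _ (pv_iterN_lt k h)
  exact main 8

-- table lookup
theorem pv_table_get (i : Nat) (h : i < 256) :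
    (PySem.List.pyGet? pvTable ((i : Nat) : Int)).getD 0 = pvCrc8 ((i : Nat) : Int) := by
  rw [PySem.List.pyGet?_natCast]
  unfold pvTable
  rw [List.getElem?_map, List.getElem?_range h]
  rfl

-- high bits pass through k steps of the model untouched
theorem pv_L (k : Nat) : ∀ x d : Nat, pvStepN^[k] (x ^^^ d * 2 ^ k) = pvStepN^[k] x ^^^ d := by
  induction k with
  | zero => intro x d; simp
  | succ k ih =>
    intro x d
    rw [Function.iterate_succ_apply, Function.iterate_succ_apply]
    have hstep : pvStepN (x ^^^ d * 2 ^ (k + 1)) = pvStepN x ^^^ d * 2 ^ k := by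
      unfold pvStepN
      have he : d * 2 ^ (k + 1) % 2 = 0 := by
        rw [pow_succ, ← Nat.mul_assoc]
        exact Nat.mul_mod_left _ 2
      have hpar : (x ^^^ d * 2 ^ (k + 1)) % 2 = x % 2 := by
        have hx := pv_xor_mod x (d * 2 ^ (k + 1)) 1
        simp only [pow_one] at hx
        rw [hx, he, Nat.xor_zero]
      have hdiv2 : d * 2 ^ (k + 1) / 2 = d * 2 ^ k := by
        rw [pow_succ, ← Nat.mul_assoc]
        omega
      have hdiv : (x ^^^ d * 2 ^ (k + 1)) / 2 = x / 2 ^^^ d * 2 ^ k := by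
        rw [Nat.xor_div_two, hdiv2]
      rw [hpar, hdiv]
      by_cases hp : x % 2 = 1
      · rw [if_pos hp, if_pos hp, Nat.xor_assoc, Nat.xor_comm (d * 2 ^ k) 40961, ← Nat.xor_assoc]
      · rw [if_neg hp, if_neg hp]
    rw [hstep, ih]

-- the table identity: stepN^8 (r ^ b) = (r >> 8) ^ stepN^8 ((r & 0xff) ^ b) for b < 256
theorem pv_T (r b : Nat) (hb : b < 256) :
    pvStepN^[8] (r ^^^ b) = (r / 256) ^^^ pvStepN^[8] ((r % 256) ^^^ b) := by
  set lo := (r % 256) ^^^ b with hlo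
  set hi := r / 256 with hhi
  have hlolt : lo < 256 := by
    have := Nat.xor_lt_two_pow (n := 8) (x := r % 256) (y := b) (by omega) (by omega)
    omega
  have hmodL : (r ^^^ b) % 2 ^ 8 = lo := by
    rw [pv_xor_mod, hlo]
    congr 1 <;> omega
  have hdivL : (r ^^^ b) / 2 ^ 8 = hi := by
    rw [pv_xor_div_pow]
    have h1 : b / 2 ^ 8 = 0 := by omega
    rw [h1, Nat.xor_zero]
    omega
  have hmodR : (lo ^^^ hi * 2 ^ 8) % 2 ^ 8 = lo := by
    rw [pv_xor_mod]
    have h1 : lo % 2 ^ 8 = lo := by omega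
    have h2 : hi * 2 ^ 8 % 2 ^ 8 = 0 := by omega
    rw [h1, h2, Nat.xor_zero]
  have hdivR : (lo ^^^ hi * 2 ^ 8) / 2 ^ 8 = hi := by
    rw [pv_xor_div_pow]
    have h1 : lo / 2 ^ 8 = 0 := by omega
    have h2 : hi * 2 ^ 8 / 2 ^ 8 = hi := by omega
    rw [h1, h2, Nat.zero_xor]
  have hkey : r ^^^ b = lo ^^^ hi * 2 ^ 8 := by omega
  rw [hkey, pv_L 8 lo hi, Nat.xor_comm]

-- ===== VERDICT (by name: the statement is the Claim_ definition above) =====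
theorem GenByeCRCModBus_spec : Claim_equal_GenByeCRCModBus := by
  intro c w _
  unfold Spec_GenByeCRCModBus GenByeCRCModBus GenByeCRCModBus_alt
  set bc : Nat := (c % 256).toNat with hbcdef
  set r : Nat := (w % 65536).toNat with hrdef
  have hbclt : bc < 256 := by omega
  have hbc : PySem.Int.band c 0xFF = ((bc : Nat) : Int) := by
    rw [pv_band255]; omega
  have hcrc : PySem.Int.band w 0xFFFF = ((r : Nat) : Int) := by
    rw [pv_band65535]; omega
  rw [hbc, hcrc, pv_foldA8]
  -- A side: the fold argument reduces to r ^^^ bc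
  have hA : ((PySem.Int.bxor w ((bc : Nat) : Int)) % 65536).toNat = r ^^^ bc := by
    rw [pv_bxor65536]
    congr 1 <;> omega
  rw [hA]
  -- B side: the table index reduces to (r % 256) ^^^ bc
  have hidx : PySem.Int.band (PySem.Int.bxor ((r : Nat) : Int) c) 0xFF
      = (((r % 256) ^^^ bc : Nat) : Int) := by
    rw [pv_band255]
    have hx := pv_bxor256 ((r : Nat) : Int) c
    have h1 : (((r : Nat) : Int) % 256).toNat = r % 256 := by omega
    rw [h1, ← hbcdef] at hx
    have hnn : (0:Int) ≤ (PySem.Int.bxor ((r : Nat) : Int) c) % 256 :=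
      Int.emod_nonneg _ (by norm_num)
    omega
  rw [hidx]
  have hidxlt : (r % 256) ^^^ bc < 256 := by
    have := Nat.xor_lt_two_pow (n := 8) (x := r % 256) (y := bc) (by omega) (by omega)
    omega
  rw [pv_table_get _ hidxlt, pv_crc8 _ (by omega)]
  have hsh : ((r : Nat) : Int) >>> (8 : Nat) = ((r / 256 : Nat) : Int) := by
    rw [pv_shr8]; omega
  rw [hsh, PySem.Int.bxor_natCast, pv_T r bc hbclt]
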